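-- pv_equiv track=rewrite | github.com/lawang24/competitive-programming-archive | Codeforces/old_code/March 15/A.py | build_special_string
-- ===== SOURCE A (Python) =====
-- def build_special_string(count):
--     """
--     Build a string of uppercase Latin letters with exactly n special characters.
--     A character is special if it is equal to exactly one of its neighbors.
--     """
--
--     if count == 1:
--         return ""
--     # Start with a base string that will guarantee the first special character.
--     base_string = "AB"  # This will have no special characters initially.
--     special_chars_needed = count
--     # Add pairs of characters to ensure we get the required number of special characters.
--     while special_chars_needed > 0:
--         if special_chars_needed % 2 == 0:  # If even number of specials needed, add "AA" or "BB"
--             if base_string[-1] == "B":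
--                 base_string += "AA"
--             else:
--                 base_string += "BB"
--             special_chars_needed -= 2  # Two special characters added.
--         else:  # For odd, just add one more to make it even (preparation step).
--             base_string += "B" if base_string[-1] == "A" else "A"
--             special_chars_needed -= 1
--
--     return base_string
-- ===== SOURCE B (Python) =====
-- def build_special_string(count):
--     """
--     Build a string of uppercase Latin letters with exactly n special characters.
--     A character is special if it is equal to exactly one of its neighbors.
--     """
--     if count == 1:
--         return ""
--     if count <= 0:
--         return "AB"
--     if count % 2 == 0:
--         suffix = ("AABB" * (count // 2 + 1))[:count]
--     else:
--         suffix = "A" + ("BBAA" * ((count - 1) // 2 + 1))[:count - 1]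
--     return "AB" + suffix
-- ===== Notes on version B (the rewrite author's own statement) =====
-- stated objective: simpler
-- what changed: Replaces A's stateful while-loop (tracking the last character and decrementing a parity counter while appending pairs) with a closed-form construction: after the trivial guards, return 'AB' plus a repeat-and-slice suffix built from repeated 'AABB' (even count) or 'A' plus repeated 'BBAA' (odd count).
import Mathlib
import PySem

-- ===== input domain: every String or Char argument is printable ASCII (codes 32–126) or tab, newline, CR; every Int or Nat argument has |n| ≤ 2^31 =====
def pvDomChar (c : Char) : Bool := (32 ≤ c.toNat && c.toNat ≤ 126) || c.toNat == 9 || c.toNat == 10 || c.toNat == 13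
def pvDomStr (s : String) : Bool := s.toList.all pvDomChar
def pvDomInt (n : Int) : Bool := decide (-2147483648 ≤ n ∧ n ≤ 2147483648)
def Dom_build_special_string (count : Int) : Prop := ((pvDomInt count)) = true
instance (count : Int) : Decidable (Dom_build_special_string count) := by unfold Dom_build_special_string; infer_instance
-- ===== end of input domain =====

-- B replaces A's stateful last-char/parity append loop by a closed-form repeat-and-slice
-- construction of the same characters (objective: simpler).


-- ===== PORT A =====
-- the while-loop of A: state = (base_string, special_chars_needed)
def buildLoop (base : List Char) (need : Int) : List Char :=
  if _h : need > 0 then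
    if PySem.Int.mod need 2 = 0 then
      if PySem.List.pyGet? base (-1) = some 'B' then
        buildLoop (base ++ ['A', 'A']) (need - 2)
      else
        buildLoop (base ++ ['B', 'B']) (need - 2)
    else
      buildLoop (base ++ [if PySem.List.pyGet? base (-1) = some 'A' then 'B' else 'A']) (need - 1)
  else base
termination_by need.toNat
decreasing_by all_goals omega

def build_special_string (count : Int) : String :=
  if count = 1 then ""
  else String.ofList (buildLoop ['A', 'B'] count)

-- ===== PORT B =====
def build_special_string_alt (count : Int) : String :=
  if count = 1 then ""
  else if count ≤ 0 then "AB"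
  else if PySem.Int.mod count 2 = 0 then
    String.ofList (['A', 'B'] ++
      PySem.List.slice ((List.replicate (PySem.Int.floordiv count 2 + 1).toNat
        ['A', 'A', 'B', 'B']).flatten) none (some count))
  else
    String.ofList (['A', 'B'] ++ 'A' ::
      PySem.List.slice ((List.replicate (PySem.Int.floordiv (count - 1) 2 + 1).toNat
        ['B', 'B', 'A', 'A']).flatten) none (some (count - 1)))

-- ===== PRECONDITION & SPEC =====
def Spec_build_special_string (count : Int) (out : String) : Prop := out = build_special_string_alt count
instance (count : Int) (out : String) : Decidable (Spec_build_special_string count out) := by unfold Spec_build_special_string; infer_instance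

-- ===== CLAIM (what is proved, stated in full; the proofs are below) =====
def Claim_equal_build_special_string : Prop := ∀ (count : Int), Dom_build_special_string count → Spec_build_special_string count (build_special_string count)

-- ===== LEMMAS AND PROOFS =====

-- the characters the even-step loop appends, starting from last character c, for k pair-steps
def cyc : Char → Nat → List Char
  | _, 0 => []
  | c, k + 1 => if c = 'B' then 'A' :: 'A' :: cyc 'A' k else 'B' :: 'B' :: cyc 'B' k

lemma rotA (m : Nat) :
    (List.replicate (m + 1) ['A', 'A', 'B', 'B']).flatten =
      'A' :: 'A' :: ((List.replicate m ['B', 'B', 'A', 'A']).flatten ++ ['B', 'B']) := by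
  induction m with
  | zero => simp
  | succ m ih =>
    rw [List.replicate_succ, List.flatten_cons, ih, List.replicate_succ, List.flatten_cons]
    simp

lemma rotB (m : Nat) :
    (List.replicate (m + 1) ['B', 'B', 'A', 'A']).flatten =
      'B' :: 'B' :: ((List.replicate m ['A', 'A', 'B', 'B']).flatten ++ ['A', 'A']) := by
  induction m with
  | zero => simp
  | succ m ih =>
    rw [List.replicate_succ, List.flatten_cons, ih, List.replicate_succ, List.flatten_cons]
    simp

lemma cyc_take : ∀ k m : Nat, k ≤ m →
    cyc 'B' k = List.take (2 * k) ((List.replicate m ['A', 'A', 'B', 'B']).flatten) ∧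
    cyc 'A' k = List.take (2 * k) ((List.replicate m ['B', 'B', 'A', 'A']).flatten) := by
  intro k
  induction k with
  | zero => intro m _; simp [cyc]
  | succ k ih =>
    intro m hm
    obtain ⟨m', rfl⟩ : ∃ m', m = m' + 1 := ⟨m - 1, by omega⟩
    have hlenA : 2 * k ≤ ((List.replicate m' ['B', 'B', 'A', 'A']).flatten).length := by
      simp [List.length_flatten]; omega
    have hlenB : 2 * k ≤ ((List.replicate m' ['A', 'A', 'B', 'B']).flatten).length := by
      simp [List.length_flatten]; omega
    have ihm := ih m' (by omega)
    constructor
    · rw [rotA]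
      show cyc 'B' (k + 1) = List.take (2 * k + 1 + 1) _
      rw [List.take_succ_cons, List.take_succ_cons,
        List.take_append_of_le_length hlenA]
      simp [cyc, ihm.2]
    · rw [rotB]
      show cyc 'A' (k + 1) = List.take (2 * k + 1 + 1) _
      rw [List.take_succ_cons, List.take_succ_cons,
        List.take_append_of_le_length hlenB]
      simp [cyc, ihm.1]

lemma mod_two_mul (k : Nat) : PySem.Int.mod (2 * (k : Int)) 2 = 0 := by
  rw [PySem.Int.mod_eq_zero_iff_dvd]; exact ⟨k, rfl⟩

lemma loop_even : ∀ (k : Nat) (base : List Char) (c : Char),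
    PySem.List.pyGet? base (-1) = some c →
    buildLoop base (2 * (k : Int)) = base ++ cyc c k := by
  intro k
  induction k with
  | zero => intro base c _; rw [buildLoop]; simp [cyc]
  | succ k ih =>
    intro base c hc
    have hpos : (0 : Int) < 2 * ((k : Int) + 1) := by positivity
    rw [buildLoop]
    push_cast
    rw [dif_pos hpos, if_pos (by exact_mod_cast mod_two_mul (k + 1)), hc]
    by_cases hcB : c = 'B'
    · subst hcB
      rw [if_pos rfl]
      have h2 : (2 : Int) * ((k : Int) + 1) - 2 = 2 * (k : Int) := by ring
      rw [h2, ih (base ++ ['A', 'A']) 'A'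
        (by rw [show base ++ ['A', 'A'] = (base ++ ['A']) ++ ['A'] by simp]
            exact PySem.List.pyGet?_neg_one_append_singleton _ _)]
      simp [cyc]
    · rw [if_neg (by simp [hcB])]
      have h2 : (2 : Int) * ((k : Int) + 1) - 2 = 2 * (k : Int) := by ring
      rw [h2, ih (base ++ ['B', 'B']) 'B'
        (by rw [show base ++ ['B', 'B'] = (base ++ ['B']) ++ ['B'] by simp]
            exact PySem.List.pyGet?_neg_one_append_singleton _ _)]
      simp [cyc, hcB]

lemma floordiv_two_mul (k : Nat) : PySem.Int.floordiv (2 * (k : Int)) 2 = k := by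
  rw [PySem.Int.floordiv_eq_ediv_of_pos (by omega)]
  exact Int.mul_ediv_cancel_left _ (by omega)

-- ===== VERDICT (by name: the statement is the Claim_ definition above) =====
theorem build_special_string_spec : Claim_equal_build_special_string := by
  intro count _
  unfold Spec_build_special_string build_special_string build_special_string_alt
  by_cases h1 : count = 1
  · simp [h1]
  rw [if_neg h1, if_neg h1]
  by_cases h0 : count ≤ 0
  · rw [if_pos h0, buildLoop, dif_neg (by omega)]
  rw [if_neg h0]
  by_cases hev : PySem.Int.mod count 2 = 0
  · -- even count = 2k, k ≥ 1
    rw [if_pos hev]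
    rw [PySem.Int.mod_eq_zero_iff_dvd] at hev
    obtain ⟨k, hk⟩ : ∃ k : Nat, count = 2 * (k : Int) := by
      obtain ⟨m, hm⟩ := hev
      exact ⟨m.toNat, by omega⟩
    subst hk
    rw [loop_even k ['A', 'B'] 'B' (by decide), floordiv_two_mul,
      PySem.List.slice_to _ (by positivity)]
    congr 1
    rw [show ((k : Int) + 1).toNat = k + 1 by omega,
      show ((2 : Int) * (k : Int)).toNat = 2 * k by omega]
    rw [(cyc_take k (k + 1) (by omega)).1]
  · -- odd count = 2k + 1
    rw [if_neg hev]
    rw [PySem.Int.mod_eq_zero_iff_dvd] at hev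
    obtain ⟨k, hk⟩ : ∃ k : Nat, count = 2 * (k : Int) + 1 := by
      refine ⟨((count - 1) / 2).toNat, ?_⟩
      omega
    subst hk
    rw [buildLoop, dif_pos (by omega),
      if_neg (by rw [PySem.Int.mod_eq_zero_iff_dvd]; exact hev)]
    have hget : PySem.List.pyGet? ['A', 'B'] (-1) = some 'B' := by decide
    rw [hget, if_neg (by decide),
      show (2 : Int) * (k : Int) + 1 - 1 = 2 * (k : Int) by ring,
      loop_even k (['A', 'B'] ++ ['A']) 'A'
        (PySem.List.pyGet?_neg_one_append_singleton _ _),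
      floordiv_two_mul, PySem.List.slice_to _ (by positivity)]
    refine congrArg String.ofList ?_
    rw [show ((k : Int) + 1).toNat = k + 1 by omega,
      show ((2 : Int) * (k : Int)).toNat = 2 * k by omega]
    rw [(cyc_take k (k + 1) (by omega)).2]
    simp
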